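-- pv_equiv track=rewrite | github.com/deepomicslab/GCNFrame | GCNFrame/GCNmodel.py | f
-- ===== SOURCE A (Python) =====
-- def f(n):
--     base = ["A", "C", "G", "T"]
--     string = ""
--     while len(string)<6:
--         s = n // 4
--         y = n % 4
--         string = string + base[y]
--         n = s
--     string = string[::-1]
--     return string
-- ===== SOURCE B (Python) =====
-- def f(n):
--     base = "ACGT"
--     m = n % 4096
--     out = []
--     for p in (1024, 256, 64, 16, 4, 1):
--         out.append(base[(m // p) % 4])
--     return "".join(out)
-- ===== Notes on version B (the rewrite author's own statement) =====
-- stated objective: alternative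
-- what changed: B normalizes once with m = n % 4096 and extracts the six base-4 digits most-significant-first by place value (1024..1), building the string in final order with no reversal, instead of A's LSB-first repeated floor-division loop followed by a reversal.
import Mathlib
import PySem

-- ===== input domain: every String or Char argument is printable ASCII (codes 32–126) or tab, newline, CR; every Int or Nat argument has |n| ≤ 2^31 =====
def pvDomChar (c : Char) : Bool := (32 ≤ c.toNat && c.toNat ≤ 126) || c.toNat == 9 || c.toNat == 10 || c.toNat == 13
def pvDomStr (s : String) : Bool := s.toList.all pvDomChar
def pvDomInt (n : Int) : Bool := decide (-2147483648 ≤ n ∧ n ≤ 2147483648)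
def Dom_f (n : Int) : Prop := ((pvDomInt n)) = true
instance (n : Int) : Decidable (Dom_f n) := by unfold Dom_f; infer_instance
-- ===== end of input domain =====

-- B extracts the six base-4 digits of n % 4096 most-significant-first by place value, building the string in final order with no reversal (alternative decomposition, same cost).


-- ===== PORT A =====
-- base = ["A", "C", "G", "T"]: one-char Python strings, ported as lists of chars
def fBase : List (List Char) := [['A'], ['C'], ['G'], ['T']]

-- the while loop: runs while len(string) < 6; each iteration appends exactly one char,
-- so fuel 6 (starting from the empty string) is exact.
def fLoop : Nat → Int → List Char → List Char
  | 0, _, s => s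
  | fuel + 1, n, s =>
      if s.length < 6 then
        let q := PySem.Int.floordiv n 4
        let y := PySem.Int.mod n 4
        fLoop fuel q (s ++ PySem.List.pyGetD fBase y [])
      else s

def f (n : Int) : String :=
  let s := fLoop 6 n []
  -- string[::-1]; slice? with step -1 never raises
  String.ofList ((PySem.List.slice? s none none (-1)).getD [])

-- ===== PORT B =====
def f_alt (n : Int) : String :=
  let base : List Char := ['A', 'C', 'G', 'T']
  let m := PySem.Int.mod n 4096
  String.ofList
    (([1024, 256, 64, 16, 4, 1] : List Int).foldl
      (fun out p => out ++ [PySem.List.pyGetD base (PySem.Int.mod (PySem.Int.floordiv m p) 4) ' '])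
      [])

-- ===== PRECONDITION & SPEC =====
def Spec_f (n : Int) (out : String) : Prop := out = f_alt n
instance (n : Int) (out : String) : Decidable (Spec_f n out) := by unfold Spec_f; infer_instance

-- ===== CLAIM (what is proved, stated in full; the proofs are below) =====
def Claim_equal_f : Prop := ∀ (n : Int), Dom_f n → Spec_f n (f n)

-- ===== LEMMAS AND PROOFS =====

-- A's lookup in the list of one-char strings, at an index of the form a % 4, is the
-- singleton of B's lookup in the char list at the same index.
theorem f_base_lookup (a : Int) :
    PySem.List.pyGetD fBase (a % 4) [] =
      [PySem.List.pyGetD (['A', 'C', 'G', 'T'] : List Char) (a % 4) ' '] := by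
  have h0 : 0 ≤ a % 4 := Int.emod_nonneg a (by norm_num)
  have h4 : a % 4 < 4 := Int.emod_lt_of_pos a (by norm_num)
  interval_cases h : (a % 4) <;> rfl

-- ===== VERDICT (by name: the statement is the Claim_ definition above) =====
theorem f_spec : Claim_equal_f := by
  intro n _
  show f n = f_alt n
  unfold f f_alt
  simp only [fLoop, PySem.List.slice?_none_none_neg_one, Option.getD_some]
  norm_num [f_base_lookup]
  congr 1
  rw [show n / 4 / 4 / 4 / 4 / 4 % 4 = n % 4096 / 1024 % 4 by omega,
      show n / 4 / 4 / 4 / 4 % 4 = n % 4096 / 256 % 4 by omega,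
      show n / 4 / 4 / 4 % 4 = n % 4096 / 64 % 4 by omega,
      show n / 4 / 4 % 4 = n % 4096 / 16 % 4 by omega,
      show n / 4 % 4 = n % 4096 / 4 % 4 by omega]
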